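-- pv_equiv track=rewrite | github.com/hacktofuture-sjec/hacktofuture4 | pipelineIQ/services/risk_classifier.py | _classify_file_types
-- ===== SOURCE A (Python) =====
-- from typing import Any
--
-- FILE_TYPE_POINTS = {
--     "tests": 0,
--     "docs": 1,
--     "business_logic": 7,
--     "infra_as_code": 14,
--     "auth": 16,
--     "db_migration": 18,
--     "secrets": 20,
-- }
--
-- def _classify_file_types(files: list[dict[str, Any]]) -> list[str]:
--     if not files:
--         return []
--
--     detected: set[str] = set()
--     code_extensions = {
--         ".py", ".js", ".jsx", ".ts", ".tsx", ".go", ".java", ".rb", ".php", ".cs", ".rs",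
--     }
--
--     for file_item in files:
--         filename = (file_item.get("filename") or "").lower()
--         if not filename:
--             continue
--
--         specific_matches: set[str] = set()
--         if any(token in filename for token in ("secret", "secrets", ".env", "vault", "credential", ".pem", ".key")):
--             specific_matches.add("secrets")
--         if any(token in filename for token in ("alembic", "flyway", "liquibase", "migration", "migrations", "schema.sql")) or filename.endswith(".sql"):
--             specific_matches.add("db_migration")
--         if any(token in filename for token in ("auth", "security", "jwt", "permission", "rbac", "oauth")):
--             specific_matches.add("auth")
--         if any(token in filename for token in ("terraform", "helm", "k8s", "kubernetes", "docker-compose", ".github/workflows", "ansible", "chart/")) or filename.endswith((".tf", ".tfvars", ".yaml", ".yml")):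
--             specific_matches.add("infra_as_code")
--         if any(token in filename for token in ("readme", "docs/", "/docs", ".md", ".rst")):
--             specific_matches.add("docs")
--         if any(token in filename for token in ("test", "tests", "spec", "__tests__")):
--             specific_matches.add("tests")
--         if filename.endswith(tuple(code_extensions)) and not specific_matches.intersection({"auth", "db_migration", "infra_as_code", "secrets"}):
--             specific_matches.add("business_logic")
--
--         detected.update(specific_matches)
--
--     return sorted(detected, key=lambda item: FILE_TYPE_POINTS.get(item, 0), reverse=True)
-- ===== SOURCE B (Python) =====
-- def _classify_file_types(files):
--     # Category-major: collect the normalized filenames once, then ask for each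
--     # category (in fixed priority order) whether any filename matches it.
--     names = []
--     for f in files:
--         n = (f.get("filename") or "").lower()
--         if n:
--             names.append(n)
--
--     def has_any(name, tokens):
--         return any(t in name for t in tokens)
--
--     def base_match(category, name):
--         if category == "secrets":
--             return has_any(name, ("secret", "secrets", ".env", "vault", "credential", ".pem", ".key"))
--         if category == "db_migration":
--             return has_any(name, ("alembic", "flyway", "liquibase", "migration", "migrations", "schema.sql")) or name.endswith(".sql")
--         if category == "auth":
--             return has_any(name, ("auth", "security", "jwt", "permission", "rbac", "oauth"))
--         if category == "infra_as_code":
--             return has_any(name, ("terraform", "helm", "k8s", "kubernetes", "docker-compose", ".github/workflows", "ansible", "chart/")) or name.endswith((".tf", ".tfvars", ".yaml", ".yml"))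
--         if category == "docs":
--             return has_any(name, ("readme", "docs/", "/docs", ".md", ".rst"))
--         if category == "tests":
--             return has_any(name, ("test", "tests", "spec", "__tests__"))
--         return False
--
--     def matches(category, name):
--         if category == "business_logic":
--             # a code file that triggers no sensitive category
--             return name.endswith((".py", ".js", ".jsx", ".ts", ".tsx", ".go", ".java", ".rb", ".php", ".cs", ".rs")) and not any(
--                 base_match(c, name) for c in ("auth", "db_migration", "infra_as_code", "secrets"))
--         return base_match(category, name)
--
--     priority = ["secrets", "db_migration", "auth", "infra_as_code", "business_logic", "docs", "tests"]
--     return [c for c in priority if any(matches(c, n) for n in names)]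
-- ===== Notes on version B (the rewrite author's own statement) =====
-- stated objective: alternative
-- what changed: Replaced A's file-major loop that accumulates a set of detected categories and then sorts it by a points table with a category-major decomposition: one existential scan of the normalized filenames per category, emitted by filtering the fixed points-priority order.
import Mathlib
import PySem

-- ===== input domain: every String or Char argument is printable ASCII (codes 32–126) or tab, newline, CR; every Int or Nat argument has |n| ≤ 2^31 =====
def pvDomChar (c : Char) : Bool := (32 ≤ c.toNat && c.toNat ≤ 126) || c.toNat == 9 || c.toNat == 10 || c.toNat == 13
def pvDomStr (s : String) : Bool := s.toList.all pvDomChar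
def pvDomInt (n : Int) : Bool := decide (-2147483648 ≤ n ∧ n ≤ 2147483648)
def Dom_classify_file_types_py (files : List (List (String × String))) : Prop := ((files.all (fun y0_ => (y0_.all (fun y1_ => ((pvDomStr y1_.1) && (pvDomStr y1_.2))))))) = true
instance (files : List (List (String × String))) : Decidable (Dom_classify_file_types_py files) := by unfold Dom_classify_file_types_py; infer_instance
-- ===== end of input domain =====

-- B re-groups the classification category-major (one existential scan of the filenames per category,
-- emitted in the fixed points-priority order) instead of A's file-major set accumulation followed by
-- a points-keyed sort; objective: alternative decomposition, same cost.


-- ===== PORT A =====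
def pvToksSecrets : List String := ["secret", "secrets", ".env", "vault", "credential", ".pem", ".key"]
def pvToksDb : List String := ["alembic", "flyway", "liquibase", "migration", "migrations", "schema.sql"]
def pvToksAuth : List String := ["auth", "security", "jwt", "permission", "rbac", "oauth"]
def pvToksInfra : List String := ["terraform", "helm", "k8s", "kubernetes", "docker-compose", ".github/workflows", "ansible", "chart/"]
def pvInfraExts : List String := [".tf", ".tfvars", ".yaml", ".yml"]
def pvToksDocs : List String := ["readme", "docs/", "/docs", ".md", ".rst"]
def pvToksTests : List String := ["test", "tests", "spec", "__tests__"]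
-- code_extensions is a set literal of distinct strings; filename.endswith(tuple(set)) is an
-- order-independent 'any', so the set is carried as its (distinct) element list
def pvCodeExts : List String := [".py", ".js", ".jsx", ".ts", ".tsx", ".go", ".java", ".rb", ".php", ".cs", ".rs"]
def pvPoints : PySem.Dict String Int :=
  PySem.Dict.ofList [("tests", 0), ("docs", 1), ("business_logic", 7), ("infra_as_code", 14),
                     ("auth", 16), ("db_migration", 18), ("secrets", 20)]

-- A's loop body building specific_matches for one (lowered, non-empty) filename, one
-- conditional set-add per stage, in A's order; 'not sm.intersection({...})' in the last
-- stage is the emptiness of that intersection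
def pvSM1 (filename : String) : PySem.Set String :=
  if pvToksSecrets.any (fun t => PySem.Str.isIn t filename) then PySem.Set.add PySem.Set.empty "secrets" else PySem.Set.empty
def pvSM2 (filename : String) : PySem.Set String :=
  if pvToksDb.any (fun t => PySem.Str.isIn t filename) || PySem.Str.endswith filename ".sql" then PySem.Set.add (pvSM1 filename) "db_migration" else pvSM1 filename
def pvSM3 (filename : String) : PySem.Set String :=
  if pvToksAuth.any (fun t => PySem.Str.isIn t filename) then PySem.Set.add (pvSM2 filename) "auth" else pvSM2 filename
def pvSM4 (filename : String) : PySem.Set String :=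
  if pvToksInfra.any (fun t => PySem.Str.isIn t filename) || pvInfraExts.any (fun e => PySem.Str.endswith filename e) then PySem.Set.add (pvSM3 filename) "infra_as_code" else pvSM3 filename
def pvSM5 (filename : String) : PySem.Set String :=
  if pvToksDocs.any (fun t => PySem.Str.isIn t filename) then PySem.Set.add (pvSM4 filename) "docs" else pvSM4 filename
def pvSM6 (filename : String) : PySem.Set String :=
  if pvToksTests.any (fun t => PySem.Str.isIn t filename) then PySem.Set.add (pvSM5 filename) "tests" else pvSM5 filename
def pvSM (filename : String) : PySem.Set String :=
  if pvCodeExts.any (fun e => PySem.Str.endswith filename e) = true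
      ∧ PySem.Set.inter (pvSM6 filename) (PySem.Set.ofList ["auth", "db_migration", "infra_as_code", "secrets"]) = []
  then PySem.Set.add (pvSM6 filename) "business_logic" else pvSM6 filename

-- one iteration of A's 'for file_item in files' loop ('continue' on the empty filename)
def pvStepA (detected : PySem.Set String) (file_item : List (String × String)) : PySem.Set String :=
  let filename := PySem.Str.lower ((PySem.Dict.ofList file_item).getD "filename" "")
  if filename = "" then detected
  else PySem.Set.update detected (pvSM filename)

def classify_file_types_py (files : List (List (String × String))) : List String :=
  if files = [] then []
  else
    let detected := files.foldl pvStepA PySem.Set.empty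
    PySem.List.sorted detected (fun item => pvPoints.getD item 0) true

-- ===== PORT B =====
def pvNormName (f : List (String × String)) : String :=
  PySem.Str.lower ((PySem.Dict.ofList f).getD "filename" "")

def pvNames (files : List (List (String × String))) : List String :=
  (files.map pvNormName).filter (fun n => n ≠ "")

def pvHasAny (name : String) (toks : List String) : Bool :=
  toks.any (fun t => PySem.Str.isIn t name)

def pvBaseMatch (category name : String) : Bool :=
  if category = "secrets" then pvHasAny name pvToksSecrets
  else if category = "db_migration" then pvHasAny name pvToksDb || PySem.Str.endswith name ".sql"
  else if category = "auth" then pvHasAny name pvToksAuth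
  else if category = "infra_as_code" then pvHasAny name pvToksInfra || pvInfraExts.any (fun e => PySem.Str.endswith name e)
  else if category = "docs" then pvHasAny name pvToksDocs
  else if category = "tests" then pvHasAny name pvToksTests
  else false

def pvMatches (category name : String) : Bool :=
  if category = "business_logic" then
    pvCodeExts.any (fun e => PySem.Str.endswith name e)
      && !(["auth", "db_migration", "infra_as_code", "secrets"].any (fun c => pvBaseMatch c name))
  else pvBaseMatch category name

def pvPriority : List String :=
  ["secrets", "db_migration", "auth", "infra_as_code", "business_logic", "docs", "tests"]

def classify_file_types_py_alt (files : List (List (String × String))) : List String :=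
  let names := pvNames files
  pvPriority.filter (fun c => names.any (fun n => pvMatches c n))

-- ===== PRECONDITION & SPEC =====
def Spec_classify_file_types_py (files : List (List (String × String))) (out : List String) : Prop := out = classify_file_types_py_alt files
instance (files : List (List (String × String))) (out : List String) : Decidable (Spec_classify_file_types_py files out) := by unfold Spec_classify_file_types_py; infer_instance

-- ===== CLAIM (what is proved, stated in full; the proofs are below) =====
def Claim_equal_classify_file_types_py : Prop := ∀ (files : List (List (String × String))), Dom_classify_file_types_py files → Spec_classify_file_types_py files (classify_file_types_py files)

-- ===== LEMMAS AND PROOFS =====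
-- the seven per-filename conditions of A's loop body, as propositions
def pvC1 (n : String) : Prop := pvToksSecrets.any (fun t => PySem.Str.isIn t n) = true
def pvC2 (n : String) : Prop := (pvToksDb.any (fun t => PySem.Str.isIn t n) || PySem.Str.endswith n ".sql") = true
def pvC3 (n : String) : Prop := pvToksAuth.any (fun t => PySem.Str.isIn t n) = true
def pvC4 (n : String) : Prop := (pvToksInfra.any (fun t => PySem.Str.isIn t n) || pvInfraExts.any (fun e => PySem.Str.endswith n e)) = true
def pvC5 (n : String) : Prop := pvToksDocs.any (fun t => PySem.Str.isIn t n) = true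
def pvC6 (n : String) : Prop := pvToksTests.any (fun t => PySem.Str.isIn t n) = true
def pvC7 (n : String) : Prop := pvCodeExts.any (fun e => PySem.Str.endswith n e) = true

lemma pv_mem_ite_add (c : Prop) [Decidable c] (s : PySem.Set String) (y x : String) :
    (x ∈ (if c then PySem.Set.add s y else s)) ↔ x ∈ s ∨ (c ∧ x = y) := by
  split_ifs with h <;> simp [PySem.Set.mem_add, h]

lemma pv_inter_nil_iff (s t : PySem.Set String) :
    PySem.Set.inter s t = [] ↔ ∀ y ∈ s, y ∉ t := by
  rw [List.eq_nil_iff_forall_not_mem]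
  constructor
  · intro h y hy hyt
    exact h y ((PySem.Set.mem_inter s t y).mpr ⟨hy, hyt⟩)
  · intro h y hy
    rcases (PySem.Set.mem_inter s t y).mp hy with ⟨h1, h2⟩
    exact h y h1 h2

lemma pv_mem_sm1 (x n : String) : x ∈ pvSM1 n ↔ (pvC1 n ∧ x = "secrets") := by
  unfold pvSM1 pvC1
  rw [pv_mem_ite_add]
  simp [PySem.Set.empty]

lemma pv_mem_sm2 (x n : String) : x ∈ pvSM2 n ↔
    (pvC1 n ∧ x = "secrets") ∨ (pvC2 n ∧ x = "db_migration") := by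
  unfold pvSM2 pvC2
  rw [pv_mem_ite_add, pv_mem_sm1]

lemma pv_mem_sm3 (x n : String) : x ∈ pvSM3 n ↔
    (pvC1 n ∧ x = "secrets") ∨ (pvC2 n ∧ x = "db_migration") ∨ (pvC3 n ∧ x = "auth") := by
  unfold pvSM3 pvC3
  rw [pv_mem_ite_add, pv_mem_sm2]
  simp only [or_assoc]

lemma pv_mem_sm4 (x n : String) : x ∈ pvSM4 n ↔
    (pvC1 n ∧ x = "secrets") ∨ (pvC2 n ∧ x = "db_migration") ∨ (pvC3 n ∧ x = "auth") ∨
    (pvC4 n ∧ x = "infra_as_code") := by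
  unfold pvSM4 pvC4
  rw [pv_mem_ite_add, pv_mem_sm3]
  simp only [or_assoc]

lemma pv_mem_sm5 (x n : String) : x ∈ pvSM5 n ↔
    (pvC1 n ∧ x = "secrets") ∨ (pvC2 n ∧ x = "db_migration") ∨ (pvC3 n ∧ x = "auth") ∨
    (pvC4 n ∧ x = "infra_as_code") ∨ (pvC5 n ∧ x = "docs") := by
  unfold pvSM5 pvC5
  rw [pv_mem_ite_add, pv_mem_sm4]
  simp only [or_assoc]

lemma pv_mem_sm6 (x n : String) : x ∈ pvSM6 n ↔
    (pvC1 n ∧ x = "secrets") ∨ (pvC2 n ∧ x = "db_migration") ∨ (pvC3 n ∧ x = "auth") ∨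
    (pvC4 n ∧ x = "infra_as_code") ∨ (pvC5 n ∧ x = "docs") ∨ (pvC6 n ∧ x = "tests") := by
  unfold pvSM6 pvC6
  rw [pv_mem_ite_add, pv_mem_sm5]
  simp only [or_assoc]

lemma pv_sens (n : String) :
    PySem.Set.inter (pvSM6 n) (PySem.Set.ofList ["auth", "db_migration", "infra_as_code", "secrets"]) = []
      ↔ ¬ pvC1 n ∧ ¬ pvC2 n ∧ ¬ pvC3 n ∧ ¬ pvC4 n := by
  rw [pv_inter_nil_iff]
  simp only [pv_mem_sm6, PySem.Set.mem_ofList]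
  constructor
  · intro h
    refine ⟨fun hc => ?_, fun hc => ?_, fun hc => ?_, fun hc => ?_⟩
    · exact h "secrets" (Or.inl ⟨hc, rfl⟩) (by decide)
    · exact h "db_migration" (Or.inr (Or.inl ⟨hc, rfl⟩)) (by decide)
    · exact h "auth" (Or.inr (Or.inr (Or.inl ⟨hc, rfl⟩))) (by decide)
    · exact h "infra_as_code" (Or.inr (Or.inr (Or.inr (Or.inl ⟨hc, rfl⟩)))) (by decide)
  · rintro ⟨h1, h2, h3, h4⟩ y (⟨hc, rfl⟩ | ⟨hc, rfl⟩ | ⟨hc, rfl⟩ | ⟨hc, rfl⟩ | ⟨hc, rfl⟩ | ⟨hc, rfl⟩)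
    exacts [absurd hc h1, absurd hc h2, absurd hc h3, absurd hc h4, by decide, by decide]

lemma pv_mem_sm (x n : String) : x ∈ pvSM n ↔
    (pvC1 n ∧ x = "secrets") ∨ (pvC2 n ∧ x = "db_migration") ∨ (pvC3 n ∧ x = "auth") ∨
    (pvC4 n ∧ x = "infra_as_code") ∨ (pvC5 n ∧ x = "docs") ∨ (pvC6 n ∧ x = "tests") ∨
    ((pvC7 n ∧ ¬ pvC1 n ∧ ¬ pvC2 n ∧ ¬ pvC3 n ∧ ¬ pvC4 n) ∧ x = "business_logic") := by
  unfold pvSM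
  rw [pv_mem_ite_add, pv_sens, pv_mem_sm6]
  unfold pvC7
  simp only [or_assoc]

lemma pv_match_secrets (n : String) : pvMatches "secrets" n = true ↔ pvC1 n := by
  simp [pvMatches, pvBaseMatch, pvHasAny, pvC1]
lemma pv_match_db (n : String) : pvMatches "db_migration" n = true ↔ pvC2 n := by
  simp [pvMatches, pvBaseMatch, pvHasAny, pvC2]
lemma pv_match_auth (n : String) : pvMatches "auth" n = true ↔ pvC3 n := by
  simp [pvMatches, pvBaseMatch, pvHasAny, pvC3]
lemma pv_match_infra (n : String) : pvMatches "infra_as_code" n = true ↔ pvC4 n := by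
  simp [pvMatches, pvBaseMatch, pvHasAny, pvC4]
lemma pv_match_docs (n : String) : pvMatches "docs" n = true ↔ pvC5 n := by
  simp [pvMatches, pvBaseMatch, pvHasAny, pvC5]
lemma pv_match_tests (n : String) : pvMatches "tests" n = true ↔ pvC6 n := by
  simp [pvMatches, pvBaseMatch, pvHasAny, pvC6]
lemma pv_match_bus (n : String) : pvMatches "business_logic" n = true ↔
    pvC7 n ∧ ¬ pvC1 n ∧ ¬ pvC2 n ∧ ¬ pvC3 n ∧ ¬ pvC4 n := by
  simp [pvMatches, pvBaseMatch, pvHasAny, pvC1, pvC2, pvC3, pvC4, pvC7]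
  tauto

lemma pv_mem_sm_iff (x n : String) :
    x ∈ pvSM n ↔ x ∈ pvPriority ∧ pvMatches x n = true := by
  rw [pv_mem_sm]
  constructor
  · rintro (⟨h, rfl⟩ | ⟨h, rfl⟩ | ⟨h, rfl⟩ | ⟨h, rfl⟩ | ⟨h, rfl⟩ | ⟨h, rfl⟩ | ⟨h, rfl⟩)
    exacts [⟨by decide, (pv_match_secrets n).mpr h⟩, ⟨by decide, (pv_match_db n).mpr h⟩,
      ⟨by decide, (pv_match_auth n).mpr h⟩, ⟨by decide, (pv_match_infra n).mpr h⟩,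
      ⟨by decide, (pv_match_docs n).mpr h⟩, ⟨by decide, (pv_match_tests n).mpr h⟩,
      ⟨by decide, (pv_match_bus n).mpr h⟩]
  · rintro ⟨hx, hm⟩
    simp only [pvPriority, List.mem_cons, List.not_mem_nil, or_false] at hx
    rcases hx with rfl | rfl | rfl | rfl | rfl | rfl | rfl
    · exact Or.inl ⟨(pv_match_secrets n).mp hm, rfl⟩
    · exact Or.inr (Or.inl ⟨(pv_match_db n).mp hm, rfl⟩)
    · exact Or.inr (Or.inr (Or.inl ⟨(pv_match_auth n).mp hm, rfl⟩))
    · exact Or.inr (Or.inr (Or.inr (Or.inl ⟨(pv_match_infra n).mp hm, rfl⟩)))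
    · exact Or.inr (Or.inr (Or.inr (Or.inr (Or.inr (Or.inr ⟨(pv_match_bus n).mp hm, rfl⟩)))))
    · exact Or.inr (Or.inr (Or.inr (Or.inr (Or.inl ⟨(pv_match_docs n).mp hm, rfl⟩))))
    · exact Or.inr (Or.inr (Or.inr (Or.inr (Or.inr (Or.inl ⟨(pv_match_tests n).mp hm, rfl⟩)))))

lemma pv_stepA_eq (s : PySem.Set String) (f : List (String × String)) :
    pvStepA s f = if pvNormName f = "" then s else PySem.Set.update s (pvSM (pvNormName f)) := rfl

lemma pv_mem_fold (files : List (List (String × String))) (s : PySem.Set String) (x : String) :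
    x ∈ files.foldl pvStepA s ↔ x ∈ s ∨ ∃ n ∈ pvNames files, x ∈ pvSM n := by
  induction files generalizing s with
  | nil => simp [pvNames]
  | cons f fs ih =>
    rw [List.foldl_cons, ih, pv_stepA_eq]
    by_cases h : pvNormName f = ""
    · simp [pvNames, h]
    · simp only [pvNames, List.map_cons, List.filter_cons, h, decide_not]
      simp [PySem.Set.mem_update]
      simp only [or_assoc]

lemma pv_nodup_fold (files : List (List (String × String))) (s : PySem.Set String) (hs : s.Nodup) :
    (files.foldl pvStepA s).Nodup := by
  induction files generalizing s with
  | nil => exact hs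
  | cons f fs ih =>
    rw [List.foldl_cons, pv_stepA_eq]
    split_ifs with h
    · exact ih s hs
    · exact ih _ (PySem.Set.nodup_update _ _ hs)

-- ===== VERDICT (by name: the statement is the Claim_ definition above) =====
theorem classify_file_types_py_spec : Claim_equal_classify_file_types_py := by
  intro files _hdom
  unfold Spec_classify_file_types_py classify_file_types_py classify_file_types_py_alt
  by_cases hf : files = []
  · subst hf; rfl
  · rw [if_neg hf]
    apply PySem.List.sorted_rev_eq_of_perm_of_pairwise_gt
    · rw [List.perm_ext_iff_of_nodup
        (List.Nodup.filter _ (by decide : pvPriority.Nodup))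
        (pv_nodup_fold files PySem.Set.empty (by simp [PySem.Set.empty]))]
      intro a
      rw [pv_mem_fold, List.mem_filter]
      simp only [PySem.Set.empty, List.not_mem_nil, false_or, List.any_eq_true]
      constructor
      · rintro ⟨hp, n, hn, hm⟩
        exact ⟨n, hn, (pv_mem_sm_iff a n).mpr ⟨hp, hm⟩⟩
      · rintro ⟨n, hn, hm⟩
        rcases (pv_mem_sm_iff a n).mp hm with ⟨hp, hmm⟩
        exact ⟨hp, n, hn, hmm⟩
    · exact List.Pairwise.filter _
        (by decide : pvPriority.Pairwise (fun a b => pvPoints.getD b 0 < pvPoints.getD a 0))
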